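-- pv_equiv track=rewrite | github.com/urielagtor/FAC-Budget-Request | app.py | build_category_dropdown_items
-- ===== SOURCE A (Python) =====
-- INDENT = "   "  # visual indent like your screenshot
--
-- HEADER_SUFFIX = ":"
--
-- def build_category_dropdown_items(tree: dict[str, list[str]]) -> tuple[list[str], dict[str, str]]:
--     """
--     Returns:
--       - display_items: list of strings shown in the dropdown (includes headers + indented subs)
--       - display_to_value: mapping from display string to stored value "Main/Sub" (subs only)
--     """
--     display_items = []
--     display_to_value = {}
--     for main, subs in tree.items():
--         header = f"{main}{HEADER_SUFFIX}"
--         display_items.append(header)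
--         for sub in subs:
--             display = f"{INDENT}{sub}"
--             display_items.append(display)
--             display_to_value[display] = f"{main}/{sub}"
--         display_items.append("")  # blank spacer line like the screenshot
--     # remove trailing blank spacer if present
--     while display_items and display_items[-1] == "":
--         display_items.pop()
--     return display_items, display_to_value
-- ===== SOURCE B (Python) =====
-- INDENT = "   "  # visual indent like your screenshot
--
-- HEADER_SUFFIX = ":"
--
-- def build_category_dropdown_items(tree: dict[str, list[str]]) -> tuple[list[str], dict[str, str]]:
--     # Simpler decomposition: build the value mapping and the per-group blocks
--     # directly, then join the blocks with a single blank spacer BETWEEN groups,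
--     # so no trailing blank is ever produced and no cleanup pass is needed.
--     display_to_value = {
--         f"{INDENT}{sub}": f"{main}/{sub}"
--         for main, subs in tree.items()
--         for sub in subs
--     }
--     blocks = [
--         [f"{main}{HEADER_SUFFIX}"] + [f"{INDENT}{sub}" for sub in subs]
--         for main, subs in tree.items()
--     ]
--     display_items = []
--     for block in blocks:
--         if display_items:
--             display_items.append("")
--         display_items += block
--     return display_items, display_to_value
-- ===== Notes on version B (the rewrite author's own statement) =====
-- stated objective: simpler
-- what changed: B builds the value mapping by a dict comprehension and the display list by joining per-group blocks with a spacer only between groups, eliminating A's trailing-blank append and its while-pop cleanup loop.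
import Mathlib
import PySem

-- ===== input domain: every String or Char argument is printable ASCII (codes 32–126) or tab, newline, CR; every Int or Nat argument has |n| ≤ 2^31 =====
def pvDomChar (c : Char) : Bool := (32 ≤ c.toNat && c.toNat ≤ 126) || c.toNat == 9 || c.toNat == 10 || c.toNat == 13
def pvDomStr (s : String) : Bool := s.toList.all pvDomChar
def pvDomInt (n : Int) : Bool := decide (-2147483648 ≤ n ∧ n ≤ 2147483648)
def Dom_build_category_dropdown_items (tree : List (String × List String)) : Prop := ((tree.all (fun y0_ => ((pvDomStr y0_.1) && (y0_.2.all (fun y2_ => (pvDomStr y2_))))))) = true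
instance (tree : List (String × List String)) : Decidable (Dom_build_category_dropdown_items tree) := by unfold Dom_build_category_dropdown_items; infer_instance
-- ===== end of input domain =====

-- B builds the value mapping and per-group blocks directly and joins blocks with a
-- spacer only between groups, removing A's trailing-blank append + while-pop cleanup.


-- ===== PORT A =====
-- the trailing 'while display_items and display_items[-1] == "": display_items.pop()'
def pvPopTrailingBlanks (l : List String) : List String :=
  if _h : l.getLast? = some "" then pvPopTrailingBlanks l.dropLast else l
  termination_by l.length
  decreasing_by
    cases l with
    | nil => simp at _h
    | cons x xs => simp [List.length_dropLast]

def build_category_dropdown_items (tree : List (String × List String)) : List String × (List (String × String)) :=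
  let res := tree.foldl
    (fun (acc : List String × PySem.Dict String String) p =>
      let header := p.1 ++ ":"
      let acc1 := acc.1 ++ [header]
      let inner := p.2.foldl
        (fun (a : List String × PySem.Dict String String) sub =>
          let display := "   " ++ sub
          (a.1 ++ [display], a.2.insert display (p.1 ++ "/" ++ sub)))
        (acc1, acc.2)
      (inner.1 ++ [""], inner.2))
    ([], PySem.Dict.empty)
  (pvPopTrailingBlanks res.1, res.2.items)

-- ===== PORT B =====
def build_category_dropdown_items_alt (tree : List (String × List String)) : List String × (List (String × String)) :=
  let d : PySem.Dict String String := tree.foldl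
    (fun d p => p.2.foldl (fun d sub => d.insert ("   " ++ sub) (p.1 ++ "/" ++ sub)) d)
    PySem.Dict.empty
  let blocks := tree.map (fun p => (p.1 ++ ":") :: p.2.map (fun sub => "   " ++ sub))
  let items := blocks.foldl (fun acc b => if acc.isEmpty then acc ++ b else acc ++ [""] ++ b) []
  (items, d.items)

-- ===== PRECONDITION & SPEC =====
def Spec_build_category_dropdown_items (tree : List (String × List String)) (out : List String × (List (String × String))) : Prop := out = build_category_dropdown_items_alt tree
instance (tree : List (String × List String)) (out : List String × (List (String × String))) : Decidable (Spec_build_category_dropdown_items tree out) := by unfold Spec_build_category_dropdown_items; infer_instance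

-- ===== CLAIM (what is proved, stated in full; the proofs are below) =====
def Claim_equal_build_category_dropdown_items : Prop := ∀ (tree : List (String × List String)), Dom_build_category_dropdown_items tree → Spec_build_category_dropdown_items tree (build_category_dropdown_items tree)

-- ===== LEMMAS AND PROOFS =====

-- the two kinds of strings A compares against "" are never ""
theorem pv_header_ne (s : String) : s ++ ":" ≠ "" := by
  intro h
  have := congrArg String.toList h
  simp at this

theorem pv_indent_ne (s : String) : "   " ++ s ≠ "" := by
  intro h
  have := congrArg String.toList h
  simp at this

def pvBlock (p : String × List String) : List String :=
  (p.1 ++ ":") :: p.2.map (fun sub => "   " ++ sub)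

theorem pvBlock_ne_nil (p : String × List String) : pvBlock p ≠ [] := by
  simp [pvBlock]

theorem pvBlock_mem_ne (p : String × List String) {x : String} (hx : x ∈ pvBlock p) : x ≠ "" := by
  simp only [pvBlock, List.mem_cons, List.mem_map] at hx
  rcases hx with h | ⟨s, _, h⟩
  · exact h ▸ pv_header_ne p.1
  · exact h ▸ pv_indent_ne s

-- pvPopTrailingBlanks facts
theorem pvPop_of_getLast?_ne (l : List String) (h : l.getLast? ≠ some "") :
    pvPopTrailingBlanks l = l := by
  rw [pvPopTrailingBlanks]
  simp [h]

theorem pvPop_append_blank (l : List String) :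
    pvPopTrailingBlanks (l ++ [""]) = pvPopTrailingBlanks l := by
  rw [pvPopTrailingBlanks]
  simp

theorem pvPop_append (a b : List String) (h : pvPopTrailingBlanks b ≠ []) :
    pvPopTrailingBlanks (a ++ b) = a ++ pvPopTrailingBlanks b := by
  induction b using List.reverseRecOn with
  | nil => simp [pvPopTrailingBlanks] at h ⊢
  | append_singleton bs x ih =>
    by_cases hx : x = ""
    · subst hx
      rw [pvPop_append_blank] at h ⊢
      rw [← List.append_assoc, pvPop_append_blank, ih h]
    · have hne : (a ++ (bs ++ [x])).getLast? ≠ some "" := by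
        rw [← List.append_assoc]
        simp [hx]
      have hne' : (bs ++ [x]).getLast? ≠ some "" := by
        simp [hx]
      rw [pvPop_of_getLast?_ne _ hne, pvPop_of_getLast?_ne _ hne']

theorem pvPop_whole (l : List String) (hne : l ≠ []) (h : ∀ x ∈ l, x ≠ "") :
    pvPopTrailingBlanks l = l := by
  apply pvPop_of_getLast?_ne
  intro hl
  exact h _ (List.mem_of_getLast? hl) rfl

-- A's inner loop over subs: items component and dict component
theorem pvA_inner (main : String) (subs : List String)
    (items : List String) (d : PySem.Dict String String) :
    subs.foldl
      (fun (a : List String × PySem.Dict String String) sub =>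
        (a.1 ++ ["   " ++ sub], a.2.insert ("   " ++ sub) (main ++ "/" ++ sub)))
      (items, d)
    = (items ++ subs.map (fun sub => "   " ++ sub),
       subs.foldl (fun d sub => d.insert ("   " ++ sub) (main ++ "/" ++ sub)) d) := by
  induction subs generalizing items d with
  | nil => simp
  | cons s rest ih => simp [ih]

-- A's outer loop, with both accumulators generalized
theorem pvA_outer (tree : List (String × List String))
    (items : List String) (d : PySem.Dict String String) :
    tree.foldl
      (fun (acc : List String × PySem.Dict String String) p =>
        let header := p.1 ++ ":"
        let acc1 := acc.1 ++ [header]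
        let inner := p.2.foldl
          (fun (a : List String × PySem.Dict String String) sub =>
            let display := "   " ++ sub
            (a.1 ++ [display], a.2.insert display (p.1 ++ "/" ++ sub)))
          (acc1, acc.2)
        (inner.1 ++ [""], inner.2))
      (items, d)
    = (items ++ tree.flatMap (fun p => pvBlock p ++ [""]),
       tree.foldl (fun d p => p.2.foldl (fun d sub => d.insert ("   " ++ sub) (p.1 ++ "/" ++ sub)) d) d) := by
  induction tree generalizing items d with
  | nil => simp
  | cons p rest ih =>
    simp only [List.foldl_cons, List.flatMap_cons]
    rw [pvA_inner p.1 p.2 (items ++ [p.1 ++ ":"]) d, ih]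
    simp [pvBlock]

-- B's joining loop: once the accumulator is nonempty, it prefixes every block with ""
theorem pvB_join (blocks : List (List String)) (acc : List String) (h : acc ≠ []) :
    blocks.foldl (fun acc b => if acc.isEmpty then acc ++ b else acc ++ [""] ++ b) acc
    = acc ++ blocks.flatMap (fun b => "" :: b) := by
  induction blocks generalizing acc with
  | nil => simp
  | cons b rest ih =>
    have hax : acc.isEmpty = false := by simpa [List.isEmpty_iff] using h
    simp only [List.foldl_cons, hax, Bool.false_eq_true, if_false, List.flatMap_cons]
    rw [ih (acc ++ [""] ++ b) (by simp)]
    simp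

-- popping A's trailing spacer yields B's between-groups layout
theorem pvPop_flatMap (tree : List (String × List String)) :
    pvPopTrailingBlanks (tree.flatMap (fun p => pvBlock p ++ [""]))
    = (tree.map pvBlock).foldl (fun acc b => if acc.isEmpty then acc ++ b else acc ++ [""] ++ b) [] := by
  cases tree with
  | nil => simp [pvPopTrailingBlanks]
  | cons p rest =>
    simp only [List.map_cons, List.foldl_cons, List.isEmpty_nil, if_true, List.nil_append]
    rw [pvB_join _ (pvBlock p) (pvBlock_ne_nil p)]
    induction rest generalizing p with
    | nil =>
      simp only [List.flatMap_cons, List.flatMap_nil, List.append_nil, List.map_nil]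
      rw [pvPop_append_blank, pvPop_whole _ (pvBlock_ne_nil p) (fun x hx => pvBlock_mem_ne p hx)]
    | cons q rest' ih =>
      have hq := ih q
      simp only [List.flatMap_cons] at hq ⊢
      rw [List.append_assoc, ← List.append_assoc (pvBlock p)]
      rw [pvPop_append (pvBlock p ++ [""]) _ ?_]
      · rw [hq]; simp
      · rw [hq]; simp [pvBlock_ne_nil q]

-- ===== VERDICT (by name: the statement is the Claim_ definition above) =====
theorem build_category_dropdown_items_spec : Claim_equal_build_category_dropdown_items := by
  intro tree _
  unfold Spec_build_category_dropdown_items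
  unfold build_category_dropdown_items build_category_dropdown_items_alt
  simp only
  rw [pvA_outer tree [] PySem.Dict.empty]
  simp only [List.nil_append]
  rw [pvPop_flatMap]
  rfl
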